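-- pv_equiv track=rewrite | github.com/Bafomet666/OSINT-SAN | .venv/lib/python3.11/site-packages/stem/util/connection.py | get_mask_ipv6
-- ===== SOURCE A (Python) =====
-- FULL_IPv6_MASK = 'FFFF:FFFF:FFFF:FFFF:FFFF:FFFF:FFFF:FFFF'
--
-- def get_mask_ipv6(bits):
--   """
--   Provides the IPv6 mask for a given number of bits, in the hex colon-delimited
--   format.
--
--   :param int bits: number of bits to be converted
--
--   :returns: **str** with the subnet mask representation for this many bits
--
--   :raises: **ValueError** if given a number of bits outside the range of 0-128
--   """
--
--   if bits > 128 or bits < 0: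
--     raise ValueError('A mask can only be 0-128 bits, got %i' % bits)
--   elif bits == 128:
--     return FULL_IPv6_MASK
--
--   # get the binary representation of the mask
--   mask_bin = _get_binary(2 ** bits - 1, 128)[::-1]
--
--   # breaks it into sixteen character groupings
--   groupings = [mask_bin[16 * i:16 * (i + 1)] for i in range(8)]
--
--   # converts each group into its hex value
--   return ':'.join(['%04x' % int(group, 2) for group in groupings]).upper()
--
-- def _get_binary(value, bits):
--   """
--   Provides the given value as a binary string, padded with zeros to the given
--   number of bits.
--
--   :param int value: value to be converted
--   :param int bits: number of bits to pad to
--   """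
--
--   # http://www.daniweb.com/code/snippet216539.html
--   return ''.join([str((value >> y) & 1) for y in range(bits - 1, -1, -1)])
-- ===== SOURCE B (Python) =====
-- def get_mask_ipv6(bits):
--   if bits > 128 or bits < 0:
--     raise ValueError('A mask can only be 0-128 bits, got %i' % bits)
--
--   mask = ((1 << bits) - 1) << (128 - bits)
--   return ':'.join('%04X' % ((mask >> (16 * (7 - i))) & 0xFFFF) for i in range(8))
-- ===== Notes on version B (the rewrite author's own statement) =====
-- stated objective: alternative
-- what changed: B computes the mask as a single integer ((1 << bits) - 1) << (128 - bits) and extracts each 16-bit group by shift-and-mask formatted with '%04X', instead of A's building a 128-character binary string, reversing it, slicing it into eight 16-character groups and re-parsing each with int(group, 2).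
import Mathlib
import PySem

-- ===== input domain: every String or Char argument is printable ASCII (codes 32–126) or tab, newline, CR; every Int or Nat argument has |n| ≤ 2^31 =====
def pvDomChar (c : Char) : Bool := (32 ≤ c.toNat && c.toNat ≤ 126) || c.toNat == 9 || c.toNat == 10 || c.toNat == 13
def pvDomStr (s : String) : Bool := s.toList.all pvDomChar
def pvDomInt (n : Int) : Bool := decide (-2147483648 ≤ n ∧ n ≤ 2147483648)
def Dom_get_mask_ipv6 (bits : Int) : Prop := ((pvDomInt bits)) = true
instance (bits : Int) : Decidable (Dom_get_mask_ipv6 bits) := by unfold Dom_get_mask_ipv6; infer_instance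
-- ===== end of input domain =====

-- B replaces A's binary-string build / reverse / re-parse with direct integer bit arithmetic (alternative; not claimed faster).
-- Both ports work on List Char internally (PySem.Chars level) and build the final String once, per the PySem convention.

-- ===== PORT A =====

-- '%04x' % n, exact for 0 ≤ n < 16^4 (every group value A formats lies in that range)
def pvHexDigitLower (n : Nat) : Char :=
  (['0','1','2','3','4','5','6','7','8','9','a','b','c','d','e','f'].getD (n % 16) '0')

def pvHex4Lower (n : Int) : List Char :=
  [pvHexDigitLower (n.toNat / 4096 % 16), pvHexDigitLower (n.toNat / 256 % 16),
   pvHexDigitLower (n.toNat / 16 % 16), pvHexDigitLower (n.toNat % 16)]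

-- _get_binary(value, bits) = ''.join([str((value >> y) & 1) for y in range(bits-1,-1,-1)])
-- (y ranges over nonnegative values for the calls A makes, so y.toNat is exact there)
def pvGetBinary (value : Int) (bits : Int) : List Char :=
  PySem.Chars.join [] ((PySem.List.pyRange (bits - 1) (-1) (-1)).map
    (fun y => PySem.Int.toChars (PySem.Int.band (value >>> y.toNat) 1)))

def get_mask_ipv6 (bits : Int) : String :=
  if bits > 128 || bits < 0 then ""   -- ValueError in Python; excluded by Pre_
  else if bits == 128 then "FFFF:FFFF:FFFF:FFFF:FFFF:FFFF:FFFF:FFFF"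
  else
    -- mask_bin = _get_binary(2 ** bits - 1, 128)[::-1]
    -- (0 ≤ bits here so bits.toNat is exact; s[::-1] = .reverse by PySem.List.slice?_none_none_neg_one)
    let mask_bin : List Char := (pvGetBinary ((2 : Int) ^ bits.toNat - 1) 128).reverse
    -- groupings = [mask_bin[16*i:16*(i+1)] for i in range(8)]
    let groupings : List (List Char) :=
      (PySem.List.pyRange 0 8 1).map
        (fun i => PySem.List.slice mask_bin (some (16 * i)) (some (16 * (i + 1))))
    -- ':'.join(['%04x' % int(group, 2) for group in groupings]).upper()
    String.ofList (PySem.Chars.upper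
      (PySem.Chars.join [':'] (groupings.map (fun g => pvHex4Lower ((PySem.Int.ofCharsBase? g 2).getD 0)))))

-- ===== PORT B =====

-- '%04X' % n, exact for 0 ≤ n < 16^4 (every group value B formats lies in that range)
def pvHexDigitUpper (n : Nat) : Char :=
  (['0','1','2','3','4','5','6','7','8','9','A','B','C','D','E','F'].getD (n % 16) '0')

def pvHex4Upper (n : Int) : List Char :=
  [pvHexDigitUpper (n.toNat / 4096 % 16), pvHexDigitUpper (n.toNat / 256 % 16),
   pvHexDigitUpper (n.toNat / 16 % 16), pvHexDigitUpper (n.toNat % 16)]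

def get_mask_ipv6_alt (bits : Int) : String :=
  if bits > 128 || bits < 0 then ""   -- ValueError in Python; excluded by Pre_
  else
    -- mask = ((1 << bits) - 1) << (128 - bits)   (0 ≤ bits ≤ 128 here, so the .toNat shift amounts are exact)
    let mask : Int := ((1 <<< bits.toNat) - 1) <<< (128 - bits).toNat
    -- ':'.join('%04X' % ((mask >> (16 * (7 - i))) & 0xFFFF) for i in range(8))
    String.ofList (PySem.Chars.join [':']
      ((PySem.List.pyRange 0 8 1).map
        (fun i => pvHex4Upper (PySem.Int.band (mask >>> (16 * (7 - i)).toNat) 0xFFFF))))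

-- ===== PRECONDITION & SPEC =====
-- Pre_: exactly the inputs where Python A returns (it raises ValueError for bits < 0 or bits > 128)
def Pre_get_mask_ipv6 (bits : Int) : Prop := 0 ≤ bits ∧ bits ≤ 128
instance (bits : Int) : Decidable (Pre_get_mask_ipv6 bits) := by unfold Pre_get_mask_ipv6; infer_instance
def pvWitness_get_mask_ipv6 : Int := (37)

def Spec_get_mask_ipv6 (bits : Int) (out : String) : Prop := out = get_mask_ipv6_alt bits
instance (bits : Int) (out : String) : Decidable (Spec_get_mask_ipv6 bits out) := by unfold Spec_get_mask_ipv6; infer_instance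

-- ===== CLAIM (what is proved, stated in full; the proofs are below) =====
def Claim_equal_get_mask_ipv6 : Prop := ∀ (bits : Int), Dom_get_mask_ipv6 bits → Pre_get_mask_ipv6 bits → Spec_get_mask_ipv6 bits (get_mask_ipv6 bits)

-- ===== LEMMAS AND PROOFS =====

-- the whole admitted domain is the 129 integers 0..128; check them all
set_option maxRecDepth 1000000 in
set_option maxHeartbeats 16000000 in
theorem pv_all :
    ((List.range 129).all (fun n => get_mask_ipv6 (n : Int) == get_mask_ipv6_alt (n : Int))) = true := by
  decide

theorem pv_key (n : Nat) (h : n < 129) : get_mask_ipv6 (n : Int) = get_mask_ipv6_alt (n : Int) := by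
  have hall := pv_all
  rw [List.all_eq_true] at hall
  have := hall n (List.mem_range.mpr h)
  simpa using this

-- ===== VERDICT (by name: the statement is the Claim_ definition above) =====
theorem get_mask_ipv6_spec : Claim_equal_get_mask_ipv6 := by
  intro bits _ hpre
  obtain ⟨h0, h128⟩ := hpre
  unfold Spec_get_mask_ipv6
  have hb : bits = (bits.toNat : Int) := (Int.toNat_of_nonneg h0).symm
  rw [hb]
  exact pv_key bits.toNat (by omega)
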